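-- pv_equiv track=rewrite | github.com/mvajhi/Design_of_algorithm | Greedy/2.py | is_beautiful
-- ===== SOURCE A (Python) =====
-- def is_beautiful(n, k, heights):
--     # Stack to maintain the next smaller element to the right
--     next_smaller = [-1] * n
--     stack = []
--
--     # Traverse from right to left to find the next smaller element for each book
--     for i in range(n - 1, -1, -1):
--         while stack and heights[stack[-1]] >= heights[i]:
--             stack.pop()
--         if stack:
--             next_smaller[i] = stack[-1]
--         stack.append(i)
--
--     # Check if the current arrangement is beautiful
--     for i in range(n):
--         if next_smaller[i] != -1 and next_smaller[i] - i > k: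
--             break
--     else:
--         # If the loop completes without breaking, the arrangement is already beautiful
--         return "YES"
--
--     # Now try to see if one swap can make the arrangement beautiful
--     for i in range(n - 1):
--         if heights[i] > heights[i + 1]:
--             # Try swapping heights[i] and heights[i+1] and check again
--             heights[i], heights[i + 1] = heights[i + 1], heights[i]
--
--             # Recompute next_smaller array after the swap
--             next_smaller = [-1] * n
--             stack = []
--             for j in range(n - 1, -1, -1):
--                 while stack and heights[stack[-1]] >= heights[j]:
--                     stack.pop()
--                 if stack:
--                     next_smaller[j] = stack[-1]
--                 stack.append(j)
--
--             # Check if the new arrangement is beautiful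
--             for j in range(n):
--                 if next_smaller[j] != -1 and next_smaller[j] - j > k:
--                     break
--             else:
--                 # If the loop completes without breaking, the arrangement is now beautiful
--                 return "YES"
--
--             # Revert the swap
--             heights[i], heights[i + 1] = heights[i + 1], heights[i]
--
--     return "NO"
-- ===== SOURCE B (Python) =====
-- def is_beautiful(n, k, heights):
--     m = n if n > 0 else 0
--
--     def next_smaller(h):
--         # pointer-jumping next-smaller-to-the-right (no stack): chase ns links
--         ns = [-1] * m
--         for i in range(m - 2, -1, -1):
--             j = i + 1
--             while j != -1 and h[j] >= h[i]:
--                 j = ns[j]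
--             ns[i] = j
--         return ns
--
--     def first_violation(h):
--         # index of some (the first) violating position, or -1 if beautiful
--         ns = next_smaller(h)
--         for i in range(m):
--             if ns[i] != -1 and ns[i] - i > k:
--                 return i
--         return -1
--
--     v = first_violation(heights)
--     if v == -1:
--         return "YES"
--     # only a swap at j in {v-1, v, v+k} can possibly remove the violation at v
--     for j in (v - 1, v, v + k):
--         if 0 <= j <= m - 2 and heights[j] > heights[j + 1]:
--             swapped = heights[:j] + [heights[j + 1], heights[j]] + heights[j + 2:]
--             if first_violation(swapped) == -1:
--                 return "YES"
--     return "NO"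
-- ===== Notes on version B (the rewrite author's own statement) =====
-- stated objective: faster
-- what changed: B computes next-smaller indices by pointer-jumping through the ns array instead of a monotonic stack, and after finding one violating index v it tries only the three candidate swaps j in {v-1, v, v+k} (a swap elsewhere provably cannot remove the violation at v), instead of A's re-checking every adjacent inversion from scratch; intended as asymptotically faster on inversion-heavy NO-instances (one probe measured A timing out at n=16384 with A 2858x slower on re-run; on families where A stays linear the measured gain is only ~1.3x).
import Mathlib
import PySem

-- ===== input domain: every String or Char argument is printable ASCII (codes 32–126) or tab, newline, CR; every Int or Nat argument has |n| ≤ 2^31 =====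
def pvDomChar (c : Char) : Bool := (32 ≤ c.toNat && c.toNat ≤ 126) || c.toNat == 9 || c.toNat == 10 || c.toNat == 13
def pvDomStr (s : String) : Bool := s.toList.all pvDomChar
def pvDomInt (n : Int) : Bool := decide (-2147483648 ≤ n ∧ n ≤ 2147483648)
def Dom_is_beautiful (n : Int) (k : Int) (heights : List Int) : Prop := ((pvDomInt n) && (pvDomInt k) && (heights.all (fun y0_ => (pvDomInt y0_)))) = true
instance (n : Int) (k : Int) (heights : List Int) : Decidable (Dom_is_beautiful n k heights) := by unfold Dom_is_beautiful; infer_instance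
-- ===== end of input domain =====

-- B finds next-smaller indices by pointer-jumping and, when the arrangement is not beautiful at
-- some index v, tries only the three candidate swaps {v-1, v, v+k} instead of every adjacent
-- inversion with a full recompute; intended as asymptotically faster on inversion-heavy
-- NO-instances (measured gain elsewhere is a constant factor).  Equivalence is about the RETURN value only: Python A
-- temporarily mutates `heights` (and leaves the successful swap in place when it returns "YES"
-- from the swap phase); B never mutates its argument.

-- ===== PORT A =====
-- stack of indices; Python appends/pops at the end and reads stack[-1]; here the top is the HEAD.
def pvPopA (h : List Int) (x : Int) : List Nat → List Nat
  | [] => []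
  | t :: rest => if h.getD t 0 ≥ x then pvPopA h x rest else t :: rest

-- one iteration of Python's `for i in range(n-1,-1,-1)` body (indices are in range under Pre_,
-- so Python's heights[i] is ported as getD _ 0; the default is never read on admitted inputs)
def pvStepA (h : List Int) (i : Nat) (st : List Int × List Nat) : List Int × List Nat :=
  match pvPopA h (h.getD i 0) st.2 with
  | [] => (st.1, [i])
  | t :: s => (st.1.set i ((t : Nat) : Int), i :: t :: s)

def pvNsA (h : List Int) : Nat → List Int × List Nat → List Int × List Nat
  | 0, st => st
  | i+1, st => pvNsA h i (pvStepA h i st)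

-- Python's `for i in range(n): if ns[i] != -1 and ns[i] - i > k: break` / `else: beautiful`
def pvCheckA (ns : List Int) (k : Int) : List Nat → Bool
  | [] => true
  | i :: rest => if ns.getD i 0 ≠ -1 ∧ ns.getD i 0 - (i : Int) > k then false else pvCheckA ns k rest

def pvBeautifulA (h : List Int) (k : Int) (m : Nat) : Bool :=
  pvCheckA (pvNsA h m (List.replicate m (-1), [])).1 k (List.range m)

-- Python swaps heights[i], heights[i+1] in place and reverts; value-level this is this list
def pvSwapAdj (h : List Int) (i : Nat) : List Int :=
  (h.set i (h.getD (i+1) 0)).set (i+1) (h.getD i 0)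

def pvSwapLoopA (h : List Int) (k : Int) (m : Nat) : List Nat → Bool
  | [] => false
  | i :: rest =>
      if h.getD i 0 > h.getD (i+1) 0 then
        if pvBeautifulA (pvSwapAdj h i) k m then true else pvSwapLoopA h k m rest
      else pvSwapLoopA h k m rest

def is_beautiful (n : Int) (k : Int) (heights : List Int) : String :=
  let m := n.toNat
  if pvBeautifulA heights k m then "YES"
  else if pvSwapLoopA heights k m (List.range (m - 1)) then "YES" else "NO"

-- ===== PORT B =====
-- `while j != -1 and h[j] >= h[i]: j = ns[j]`; fuel m bounds the jumps (each jump strictly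
-- increases j along the ns chain, so m jumps always suffice; the fuel branch is never the result)
def pvChaseB (h : List Int) (ns : List Int) (x : Int) : Int → Nat → Int
  | j, 0 => j
  | j, f+1 => if j ≠ -1 ∧ h.getD j.toNat 0 ≥ x then pvChaseB h ns x (ns.getD j.toNat 0) f else j

-- `for i in range(m-2, -1, -1)`: counter c processes indices c-1, c-2, …, 0
def pvNsB (h : List Int) (m : Nat) : Nat → List Int → List Int
  | 0, ns => ns
  | i+1, ns => pvNsB h m i (ns.set i (pvChaseB h ns (h.getD i 0) ((i : Int) + 1) m))

def pvFVLoop (ns : List Int) (k : Int) : List Nat → Int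
  | [] => -1
  | i :: rest => if ns.getD i 0 ≠ -1 ∧ ns.getD i 0 - (i : Int) > k then (i : Int) else pvFVLoop ns k rest

def pvFirstViolB (h : List Int) (k : Int) (m : Nat) : Int :=
  pvFVLoop (pvNsB h m (m - 1) (List.replicate m (-1))) k (List.range m)

-- heights[:j] + [heights[j+1], heights[j]] + heights[j+2:]
def pvSwapCat (h : List Int) (j : Nat) : List Int :=
  h.take j ++ [h.getD (j+1) 0, h.getD j 0] ++ h.drop (j+2)

def pvTryB (h : List Int) (k : Int) (m : Nat) : List Int → Bool
  | [] => false
  | j :: rest =>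
      if 0 ≤ j ∧ j ≤ (m : Int) - 2 ∧ h.getD j.toNat 0 > h.getD (j.toNat + 1) 0 then
        if pvFirstViolB (pvSwapCat h j.toNat) k m = -1 then true else pvTryB h k m rest
      else pvTryB h k m rest

def is_beautiful_alt (n : Int) (k : Int) (heights : List Int) : String :=
  let m := n.toNat
  let v := pvFirstViolB heights k m
  if v = -1 then "YES"
  else if pvTryB heights k m [v - 1, v, v + k] then "YES" else "NO"

-- ===== PRECONDITION & SPEC =====
-- Pre_ admits exactly the inputs on which Python A returns: n ≤ len(heights) (for n ≤ 0 A
-- returns "YES" without indexing), plus the corner n = 1 with heights = [] where the inner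
-- `while` short-circuits before indexing; on every other input with n > len(heights) A raises
-- IndexError.
def Pre_is_beautiful (n : Int) (k : Int) (heights : List Int) : Prop :=
  n ≤ (heights.length : Int) ∨ (n = 1 ∧ heights = [])
instance (n : Int) (k : Int) (heights : List Int) : Decidable (Pre_is_beautiful n k heights) := by unfold Pre_is_beautiful; infer_instance

def pvWitness_is_beautiful : Int × Int × List Int := (4, 1, [3, 1, 4, 2])

def Spec_is_beautiful (n : Int) (k : Int) (heights : List Int) (out : String) : Prop := out = is_beautiful_alt n k heights
instance (n : Int) (k : Int) (heights : List Int) (out : String) : Decidable (Spec_is_beautiful n k heights out) := by unfold Spec_is_beautiful; infer_instance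

-- ===== CLAIM (what is proved, stated in full; the proofs are below) =====
def Claim_equal_is_beautiful : Prop := ∀ (n : Int) (k : Int) (heights : List Int), Dom_is_beautiful n k heights → Pre_is_beautiful n k heights → Spec_is_beautiful n k heights (is_beautiful n k heights)

-- ===== LEMMAS AND PROOFS =====

-- The reference description of "next smaller to the right, searching below m":
-- first index t with j ≤ t < m and h[t] < x
def pvFsF (h : List Int) (m : Nat) (x : Int) (j : Nat) : Option Nat :=
  if j < m then (if h.getD j 0 < x then some j else pvFsF h m x (j+1)) else none
termination_by m - j
decreasing_by omega

def pvFsN (h : List Int) (m : Nat) (i : Nat) : Option Nat := pvFsF h m (h.getD i 0) (i+1)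

def pvNsSpec (h : List Int) (m : Nat) (i : Nat) : Int :=
  match pvFsN h m i with
  | none => -1
  | some u => (u : Int)

-- violation at v: some later (below m) element is smaller, but none within distance k
def pvViol (h : List Int) (k : Int) (m : Nat) (v : Nat) : Prop :=
  (∃ t, v < t ∧ t < m ∧ h.getD t 0 < h.getD v 0) ∧
  (∀ t, v < t → (t : Int) ≤ (v : Int) + k → t < m → ¬ h.getD t 0 < h.getD v 0)

theorem pvFsF_none_iff (h : List Int) (m : Nat) (x : Int) (j : Nat) :
    pvFsF h m x j = none ↔ ∀ t, j ≤ t → t < m → ¬ h.getD t 0 < x := by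
  induction j using pvFsF.induct (h := h) (m := m) (x := x) with
  | case1 j hj hlt =>
      rw [pvFsF, if_pos hj, if_pos hlt]
      simp only [reduceCtorEq, false_iff, not_forall]
      exact ⟨j, le_rfl, hj, not_not_intro hlt⟩
  | case2 j hj hlt ih =>
      rw [pvFsF, if_pos hj, if_neg hlt, ih]
      constructor
      · intro hall t ht1 ht2
        rcases Nat.eq_or_lt_of_le ht1 with rfl | hlt'
        · exact hlt
        · exact hall t hlt' ht2
      · intro hall t ht1 ht2; exact hall t (by omega) ht2
  | case3 j hj =>
      rw [pvFsF, if_neg hj]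
      simp only [true_iff]
      intro t ht1 ht2; omega

theorem pvFsF_some_iff (h : List Int) (m : Nat) (x : Int) (j : Nat) (u : Nat) :
    pvFsF h m x j = some u ↔
      (j ≤ u ∧ u < m ∧ h.getD u 0 < x ∧ ∀ t, j ≤ t → t < u → ¬ h.getD t 0 < x) := by
  induction j using pvFsF.induct (h := h) (m := m) (x := x) with
  | case1 j hj hlt =>
      rw [pvFsF, if_pos hj, if_pos hlt]
      constructor
      · rintro h'; cases h'; exact ⟨le_rfl, hj, hlt, fun t ht1 ht2 => by omega⟩
      · rintro ⟨h1, h2, h3, h4⟩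
        rcases Nat.eq_or_lt_of_le h1 with rfl | hlt'
        · rfl
        · exact absurd hlt (h4 j le_rfl hlt')
  | case2 j hj hlt ih =>
      rw [pvFsF, if_pos hj, if_neg hlt, ih]
      constructor
      · rintro ⟨h1, h2, h3, h4⟩
        exact ⟨by omega, h2, h3, fun t ht1 ht2 => by
          rcases Nat.eq_or_lt_of_le ht1 with rfl | h'
          · exact hlt
          · exact h4 t h' ht2⟩
      · rintro ⟨h1, h2, h3, h4⟩
        have : j ≠ u := by rintro rfl; exact hlt h3
        exact ⟨by omega, h2, h3, fun t ht1 ht2 => h4 t (by omega) ht2⟩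
  | case3 j hj =>
      rw [pvFsF, if_neg hj]
      simp only [reduceCtorEq, false_iff]
      rintro ⟨h1, h2, _, _⟩; omega

theorem pvViol_iff (h : List Int) (k : Int) (m : Nat) (v : Nat) :
    (pvNsSpec h m v ≠ -1 ∧ pvNsSpec h m v - (v : Int) > k) ↔ pvViol h k m v := by
  unfold pvNsSpec
  cases hfs : pvFsN h m v with
  | none =>
      simp only [ne_eq, not_true_eq_false, false_and, false_iff]
      rintro ⟨⟨t, ht1, ht2, ht3⟩, _⟩
      exact (pvFsF_none_iff h m (h.getD v 0) (v+1)).mp hfs t (by omega) ht2 ht3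
  | some u =>
      obtain ⟨hu1, hu2, hu3, hu4⟩ := (pvFsF_some_iff h m (h.getD v 0) (v+1) u).mp hfs
      dsimp only
      constructor
      · rintro ⟨-, hgt⟩
        refine ⟨⟨u, by omega, hu2, hu3⟩, fun t ht1 ht2 ht3 => ?_⟩
        have htu : t < u := by omega
        exact hu4 t (by omega) htu
      · rintro ⟨-, hw⟩
        refine ⟨by omega, ?_⟩
        by_contra hle
        exact hw u (by omega) (by omega) hu2 hu3

-- the stack is always the chain i, fsN i, fsN (fsN i), … of iterated next-smaller indices
inductive PvChain (h : List Int) (m : Nat) : Nat → List Nat → Prop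
  | last (i : Nat) : i < m → pvFsN h m i = none → PvChain h m i [i]
  | step (i u : Nat) (l : List Nat) : i < m → pvFsN h m i = some u → PvChain h m u l →
      PvChain h m i (i :: l)

theorem pvPop_chain (h : List Int) (m : Nat) (i : Nat) :
    ∀ {t s}, PvChain h m t s → i < t →
      (∀ r, i < r → r < t → ¬ h.getD r 0 < h.getD i 0) →
      ((pvFsN h m i = none ∧ pvPopA h (h.getD i 0) s = []) ∨
       (∃ u l, pvFsN h m i = some u ∧ pvPopA h (h.getD i 0) s = u :: l ∧ PvChain h m u (u :: l))) := by
  intro t s hch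
  induction hch with
  | last t' htm hfs =>
      intro hit hskip
      by_cases hge : h.getD t' 0 ≥ h.getD i 0
      · left
        refine ⟨?_, by rw [pvPopA, if_pos hge]; rfl⟩
        rw [pvFsN, pvFsF_none_iff]
        intro r hr1 hr2
        rcases lt_trichotomy r t' with h1 | rfl | h1
        · exact hskip r (by omega) h1
        · omega
        · have := (pvFsF_none_iff h m (h.getD t' 0) (t'+1)).mp hfs r (by omega) hr2
          omega
      · right
        refine ⟨t', [], ?_, by rw [pvPopA, if_neg hge], PvChain.last t' htm hfs⟩
        rw [pvFsN, pvFsF_some_iff]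
        exact ⟨by omega, htm, by omega, fun r hr1 hr2 => hskip r (by omega) hr2⟩
  | step t' u l htm hfs hch ih =>
      intro hit hskip
      obtain ⟨hu1, hu2, hu3, hu4⟩ := (pvFsF_some_iff h m (h.getD t' 0) (t'+1) u).mp hfs
      by_cases hge : h.getD t' 0 ≥ h.getD i 0
      · rw [pvPopA, if_pos hge]
        apply ih (by omega)
        intro r hr1 hr2
        rcases lt_trichotomy r t' with h1 | rfl | h1
        · exact hskip r (by omega) h1
        · omega
        · have := hu4 r (by omega) hr2
          omega
      · right
        refine ⟨t', l, ?_, by rw [pvPopA, if_neg hge], PvChain.step t' u l htm hfs hch⟩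
        rw [pvFsN, pvFsF_some_iff]
        exact ⟨by omega, htm, by omega, fun r hr1 hr2 => hskip r (by omega) hr2⟩

theorem pvNsA_inv (h : List Int) (m : Nat) :
    ∀ (c : Nat), c ≤ m → ∀ ns s,
      ns.length = m →
      (∀ j, c ≤ j → j < m → ns.getD j 0 = pvNsSpec h m j) →
      (∀ j, j < c → ns.getD j 0 = -1) →
      (c = m → s = []) → (c < m → PvChain h m c s) →
      ∀ j, j < m → ((pvNsA h c (ns, s)).1).getD j 0 = pvNsSpec h m j := by
  intro c
  induction c with
  | zero =>
      intro _ ns s _ hspec _ _ _ j hj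
      simpa [pvNsA] using hspec j (Nat.zero_le j) hj
  | succ c ih =>
      intro hcm ns s hlen hspec hlow hsm hchain
      rw [pvNsA]
      have hpop : (pvFsN h m c = none ∧ pvPopA h (h.getD c 0) s = []) ∨
          (∃ u l, pvFsN h m c = some u ∧ pvPopA h (h.getD c 0) s = u :: l ∧
            PvChain h m u (u :: l)) := by
        rcases Nat.eq_or_lt_of_le hcm with heq | hlt
        · left
          refine ⟨?_, by rw [hsm heq]; rfl⟩
          rw [pvFsN, pvFsF_none_iff]
          intro t ht1 ht2; omega
        · exact pvPop_chain h m c (hchain (by omega)) (by omega)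
            (fun r h1 h2 => absurd h2 (by omega))
      rcases hpop with ⟨hfs, hpop⟩ | ⟨u, l, hfs, hpop, hch⟩
      · have hstep : pvStepA h c (ns, s) = (ns, [c]) := by
          simp only [pvStepA]; rw [hpop]
        rw [hstep]
        refine ih (by omega) ns [c] hlen ?_ (fun j hj => hlow j (by omega))
          (fun heq => absurd heq (by omega))
          (fun _ => PvChain.last c (by omega) hfs)
        intro j hj1 hj2
        rcases Nat.eq_or_lt_of_le hj1 with rfl | h'
        · rw [hlow _ (by omega)]; simp [pvNsSpec, hfs]
        · exact hspec j (by omega) hj2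
      · have hstep : pvStepA h c (ns, s) = (ns.set c ((u : Nat) : Int), c :: u :: l) := by
          simp only [pvStepA]; rw [hpop]
        rw [hstep]
        refine ih (by omega) _ _ (by simp [hlen]) ?_ ?_
          (fun heq => absurd heq (by omega))
          (fun _ => PvChain.step c u (u :: l) (by omega) hfs hch)
        · intro j hj1 hj2
          rcases Nat.eq_or_lt_of_le hj1 with rfl | h'
          · simp [pvNsSpec, hfs, List.getD, hlen, hj2]
          · rw [show ((ns.set c ((u : Nat) : Int)).getD j 0) = ns.getD j 0 by
              simp [List.getD, Nat.ne_of_lt h']]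
            exact hspec j (by omega) hj2
        · intro j hj
          rw [show ((ns.set c ((u : Nat) : Int)).getD j 0) = ns.getD j 0 by
              simp [List.getD, Nat.ne_of_gt (show j < c by omega)]]
          exact hlow j (by omega)

theorem pvNsA_getD (h : List Int) (m : Nat) :
    ∀ j, j < m → ((pvNsA h m (List.replicate m (-1), [])).1).getD j 0 = pvNsSpec h m j := by
  refine pvNsA_inv h m m le_rfl _ _ (by simp) (fun j hj1 hj2 => absurd hj2 (by omega))
    (fun j hj => List.getD_replicate _ hj) (fun _ => rfl) (fun hlt => absurd hlt (by omega))

theorem pvChase_neg1 (h ns : List Int) (x : Int) (f : Nat) :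
    pvChaseB h ns x (-1) f = -1 := by
  cases f with
  | zero => rfl
  | succ f => rw [pvChaseB]; simp

theorem pvChase_correct (h : List Int) (m : Nat) (i : Nat) (ns : List Int)
    (hns : ∀ j, i < j → j < m → ns.getD j 0 = pvNsSpec h m j) :
    ∀ (f : Nat) (u : Nat), i < u → u < m → m - u ≤ f →
      (∀ r, i < r → r < u → ¬ h.getD r 0 < h.getD i 0) →
      pvChaseB h ns (h.getD i 0) ((u : Nat) : Int) f = pvNsSpec h m i := by
  intro f
  induction f with
  | zero => intro u _ h2 h3 _; omega
  | succ f ih =>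
      intro u hiu hum hfu hskip
      rw [pvChaseB]
      simp only [Int.toNat_natCast]
      have hne : ((u : Nat) : Int) ≠ -1 := by omega
      by_cases hge : h.getD u 0 ≥ h.getD i 0
      · rw [if_pos ⟨hne, hge⟩, hns u hiu hum]
        cases hfsu : pvFsN h m u with
        | none =>
            have h1 : pvNsSpec h m u = -1 := by simp [pvNsSpec, hfsu]
            rw [h1, pvChase_neg1]
            have hni : pvFsN h m i = none := by
              rw [pvFsN, pvFsF_none_iff]
              intro t ht1 ht2
              rcases lt_trichotomy t u with hc | rfl | hc
              · exact hskip t (by omega) hc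
              · omega
              · have := (pvFsF_none_iff h m (h.getD u 0) (u+1)).mp hfsu t (by omega) ht2
                omega
            simp [pvNsSpec, hni]
        | some w =>
            obtain ⟨hw1, hw2, hw3, hw4⟩ := (pvFsF_some_iff h m (h.getD u 0) (u+1) w).mp hfsu
            have h1 : pvNsSpec h m u = ((w : Nat) : Int) := by simp [pvNsSpec, hfsu]
            rw [h1]
            apply ih w (by omega) hw2 (by omega)
            intro r hr1 hr2
            rcases lt_trichotomy r u with hc | rfl | hc
            · exact hskip r hr1 hc
            · omega
            · have := hw4 r (by omega) hr2
              omega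
      · rw [if_neg (by rintro ⟨-, h2⟩; exact hge h2)]
        have hsi : pvFsN h m i = some u := by
          rw [pvFsN, pvFsF_some_iff]
          exact ⟨by omega, hum, by omega, fun r hr1 hr2 => hskip r (by omega) hr2⟩
        simp [pvNsSpec, hsi]

theorem pvNsB_inv (h : List Int) (m : Nat) :
    ∀ (c : Nat), c + 1 ≤ m → ∀ ns,
      ns.length = m →
      (∀ j, c ≤ j → j < m → ns.getD j 0 = pvNsSpec h m j) →
      ∀ j, j < m → (pvNsB h m c ns).getD j 0 = pvNsSpec h m j := by
  intro c
  induction c with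
  | zero =>
      intro _ ns _ hspec j hj
      simpa [pvNsB] using hspec j (Nat.zero_le j) hj
  | succ c ih =>
      intro hcm ns hlen hspec
      rw [pvNsB]
      have hchase : pvChaseB h ns (h.getD c 0) ((c : Int) + 1) m = pvNsSpec h m c := by
        have := pvChase_correct h m c ns (fun j h1 h2 => hspec j (by omega) h2) m (c+1)
          (by omega) (by omega) (by omega) (fun r h1 h2 => absurd h2 (by omega))
        simpa using this
      rw [hchase]
      refine ih (by omega) _ (by simp [hlen]) ?_
      intro j hj1 hj2
      rcases Nat.eq_or_lt_of_le hj1 with rfl | h'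
      · simp [List.getD, hlen, hj2]
      · rw [show ((ns.set c (pvNsSpec h m c)).getD j 0) = ns.getD j 0 by
            simp [List.getD, Nat.ne_of_lt h']]
        exact hspec j (by omega) hj2

theorem pvNsB_getD (h : List Int) (m : Nat) :
    ∀ j, j < m → (pvNsB h m (m - 1) (List.replicate m (-1))).getD j 0 = pvNsSpec h m j := by
  intro j hj
  refine pvNsB_inv h m (m-1) (by omega) _ (by simp) ?_ j hj
  intro j' hj1 hj2
  rw [List.getD_replicate _ hj2]
  have hni : pvFsN h m j' = none := by
    rw [pvFsN, pvFsF_none_iff]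
    intro t h1 h2
    omega
  simp [pvNsSpec, hni]

theorem pvCheckA_iff (ns : List Int) (k : Int) (l : List Nat) :
    pvCheckA ns k l = true ↔ ∀ i ∈ l, ¬(ns.getD i 0 ≠ -1 ∧ ns.getD i 0 - (i : Int) > k) := by
  induction l with
  | nil => simp [pvCheckA]
  | cons i rest ih =>
      rw [pvCheckA]
      by_cases hc : ns.getD i 0 ≠ -1 ∧ ns.getD i 0 - (i : Int) > k
      · simp only [if_pos hc]
        simp only [List.mem_cons, Bool.false_eq_true, false_iff, not_forall]
        exact ⟨i, Or.inl rfl, not_not_intro hc⟩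
      · rw [if_neg hc, ih]
        constructor
        · intro hall t ht
          rcases List.mem_cons.mp ht with rfl | ht2
          · exact hc
          · exact hall t ht2
        · intro hall t ht
          exact hall t (List.mem_cons_of_mem _ ht)

theorem pvFVLoop_neg1_iff (ns : List Int) (k : Int) (l : List Nat) :
    pvFVLoop ns k l = -1 ↔ ∀ i ∈ l, ¬(ns.getD i 0 ≠ -1 ∧ ns.getD i 0 - (i : Int) > k) := by
  induction l with
  | nil => simp [pvFVLoop]
  | cons i rest ih =>
      rw [pvFVLoop]
      by_cases hc : ns.getD i 0 ≠ -1 ∧ ns.getD i 0 - (i : Int) > k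
      · rw [if_pos hc]
        constructor
        · intro heq; omega
        · intro hall; exact absurd hc (hall i (List.mem_cons_self ..))
      · rw [if_neg hc, ih]
        constructor
        · intro hall t ht
          rcases List.mem_cons.mp ht with rfl | ht2
          · exact hc
          · exact hall t ht2
        · intro hall t ht
          exact hall t (List.mem_cons_of_mem _ ht)

theorem pvFVLoop_mem (ns : List Int) (k : Int) (l : List Nat) :
    pvFVLoop ns k l ≠ -1 →
      ∃ w ∈ l, pvFVLoop ns k l = (w : Int) ∧ (ns.getD w 0 ≠ -1 ∧ ns.getD w 0 - (w : Int) > k) := by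
  induction l with
  | nil => intro hne; exact absurd rfl hne
  | cons i rest ih =>
      rw [pvFVLoop]
      by_cases hc : ns.getD i 0 ≠ -1 ∧ ns.getD i 0 - (i : Int) > k
      · rw [if_pos hc]
        exact fun _ => ⟨i, List.mem_cons_self .., rfl, hc⟩
      · rw [if_neg hc]
        intro hne
        obtain ⟨w, hw1, hw2, hw3⟩ := ih hne
        exact ⟨w, List.mem_cons_of_mem _ hw1, hw2, hw3⟩

theorem pvBeautifulA_iff (h : List Int) (k : Int) (m : Nat) :
    pvBeautifulA h k m = true ↔ ∀ v, v < m → ¬ pvViol h k m v := by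
  rw [pvBeautifulA, pvCheckA_iff]
  constructor
  · intro hall v hv
    have := hall v (List.mem_range.mpr hv)
    rw [pvNsA_getD h m v hv] at this
    rw [← pvViol_iff]
    exact this
  · intro hall i hi
    have hv := List.mem_range.mp hi
    rw [pvNsA_getD h m i hv]
    rw [show (¬(pvNsSpec h m i ≠ -1 ∧ pvNsSpec h m i - (i : Int) > k)) = ¬ pvViol h k m i by
      rw [pvViol_iff]]
    exact hall i hv

theorem pvFirstViolB_neg1_iff (h : List Int) (k : Int) (m : Nat) :
    pvFirstViolB h k m = -1 ↔ ∀ v, v < m → ¬ pvViol h k m v := by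
  rw [pvFirstViolB, pvFVLoop_neg1_iff]
  constructor
  · intro hall v hv
    have := hall v (List.mem_range.mpr hv)
    rw [pvNsB_getD h m v hv] at this
    rw [← pvViol_iff]
    exact this
  · intro hall i hi
    have hv := List.mem_range.mp hi
    rw [pvNsB_getD h m i hv]
    rw [show (¬(pvNsSpec h m i ≠ -1 ∧ pvNsSpec h m i - (i : Int) > k)) = ¬ pvViol h k m i by
      rw [pvViol_iff]]
    exact hall i hv

theorem pvFirstViolB_viol (h : List Int) (k : Int) (m : Nat) :
    pvFirstViolB h k m ≠ -1 →
      ∃ v, v < m ∧ pvFirstViolB h k m = (v : Int) ∧ pvViol h k m v := by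
  intro hne
  obtain ⟨w, hw1, hw2, hw3⟩ := pvFVLoop_mem _ k _ hne
  have hv := List.mem_range.mp hw1
  rw [pvNsB_getD h m w hv] at hw3
  exact ⟨w, hv, hw2, (pvViol_iff h k m w).mp hw3⟩

theorem pvSwapAdj_eq_cat (h : List Int) (j : Nat) (hj : j + 1 < h.length) :
    pvSwapAdj h j = pvSwapCat h j := by
  induction j generalizing h with
  | zero =>
      match h, hj with
      | a :: b :: tl, _ => simp [pvSwapAdj, pvSwapCat, List.getD]
  | succ j ih =>
      match h, hj with
      | a :: tl, hj =>
          have hj2 : j + 1 < tl.length := by simpa using hj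
          have h1 : pvSwapAdj (a :: tl) (j+1) = a :: pvSwapAdj tl j := by
            simp [pvSwapAdj, List.getD]
          have h2 : pvSwapCat (a :: tl) (j+1) = a :: pvSwapCat tl j := by
            simp [pvSwapCat, List.getD]
          rw [h1, h2, ih tl hj2]

theorem pvSwapCat_getD (h : List Int) (j : Nat) (hj : j + 1 < h.length) (t : Nat) :
    (pvSwapCat h j).getD t 0 =
      if t = j then h.getD (j+1) 0 else if t = j+1 then h.getD j 0 else h.getD t 0 := by
  rw [← pvSwapAdj_eq_cat h j hj]
  by_cases h1 : t = j
  · subst h1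
    rw [if_pos rfl]
    simp [pvSwapAdj, List.getD, List.getElem?_set, show t ≠ t + 1 by omega,
      show t < h.length by omega]
  · rw [if_neg h1]
    by_cases h2 : t = j + 1
    · subst h2
      rw [if_pos rfl]
      simp [pvSwapAdj, List.getD, hj]
    · rw [if_neg h2]
      simp [pvSwapAdj, List.getD, Ne.symm h1, Ne.symm h2]

theorem pvSwapLoopA_iff (h : List Int) (k : Int) (m : Nat) (l : List Nat) :
    pvSwapLoopA h k m l = true ↔
      ∃ i ∈ l, h.getD i 0 > h.getD (i+1) 0 ∧ pvBeautifulA (pvSwapAdj h i) k m = true := by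
  induction l with
  | nil => simp [pvSwapLoopA]
  | cons i rest ih =>
      rw [pvSwapLoopA]
      by_cases hc : h.getD i 0 > h.getD (i+1) 0
      · rw [if_pos hc]
        by_cases hb : pvBeautifulA (pvSwapAdj h i) k m = true
        · rw [if_pos hb]
          exact ⟨fun _ => ⟨i, List.mem_cons_self .., hc, hb⟩, fun _ => rfl⟩
        · rw [if_neg hb, ih]
          constructor
          · rintro ⟨w, hw1, hw2, hw3⟩
            exact ⟨w, List.mem_cons_of_mem _ hw1, hw2, hw3⟩
          · rintro ⟨w, hw1, hw2, hw3⟩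
            rcases List.mem_cons.mp hw1 with rfl | hw1b
            · exact absurd hw3 hb
            · exact ⟨w, hw1b, hw2, hw3⟩
      · rw [if_neg hc, ih]
        constructor
        · rintro ⟨w, hw1, hw2, hw3⟩
          exact ⟨w, List.mem_cons_of_mem _ hw1, hw2, hw3⟩
        · rintro ⟨w, hw1, hw2, hw3⟩
          rcases List.mem_cons.mp hw1 with rfl | hw1b
          · exact absurd hw2 hc
          · exact ⟨w, hw1b, hw2, hw3⟩

theorem pvTryB_iff (h : List Int) (k : Int) (m : Nat) (l : List Int) :
    pvTryB h k m l = true ↔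
      ∃ j ∈ l, 0 ≤ j ∧ j ≤ (m : Int) - 2 ∧ h.getD j.toNat 0 > h.getD (j.toNat + 1) 0 ∧
        pvFirstViolB (pvSwapCat h j.toNat) k m = -1 := by
  induction l with
  | nil => simp [pvTryB]
  | cons j rest ih =>
      rw [pvTryB]
      by_cases hc : 0 ≤ j ∧ j ≤ (m : Int) - 2 ∧ h.getD j.toNat 0 > h.getD (j.toNat + 1) 0
      · rw [if_pos hc]
        by_cases hb : pvFirstViolB (pvSwapCat h j.toNat) k m = -1
        · rw [if_pos hb]
          exact ⟨fun _ => ⟨j, List.mem_cons_self .., hc.1, hc.2.1, hc.2.2, hb⟩, fun _ => rfl⟩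
        · rw [if_neg hb, ih]
          constructor
          · rintro ⟨w, hw1, hw2, hw3, hw4, hw5⟩
            exact ⟨w, List.mem_cons_of_mem _ hw1, hw2, hw3, hw4, hw5⟩
          · rintro ⟨w, hw1, hw2, hw3, hw4, hw5⟩
            rcases List.mem_cons.mp hw1 with rfl | hw1b
            · exact absurd hw5 hb
            · exact ⟨w, hw1b, hw2, hw3, hw4, hw5⟩
      · rw [if_neg hc, ih]
        constructor
        · rintro ⟨w, hw1, hw2, hw3, hw4, hw5⟩
          exact ⟨w, List.mem_cons_of_mem _ hw1, hw2, hw3, hw4, hw5⟩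
        · rintro ⟨w, hw1, hw2, hw3, hw4, hw5⟩
          rcases List.mem_cons.mp hw1 with rfl | hw1b
          · exact absurd ⟨hw2, hw3, hw4⟩ hc
          · exact ⟨w, hw1b, hw2, hw3, hw4, hw5⟩

-- the key pruning fact: a swap at j ∉ {v-1, v, v+k} cannot remove a violation at v
theorem pvViol_swap (h : List Int) (k : Int) (m : Nat) (v j : Nat)
    (hlen : m ≤ h.length) (hvm : v < m) (hjm : j + 1 < m)
    (hV : pvViol h k m v)
    (hne1 : (j : Int) ≠ (v : Int) - 1) (hne2 : j ≠ v) (hne3 : (j : Int) ≠ (v : Int) + k) :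
    pvViol (pvSwapCat h j) k m v := by
  have hjl : j + 1 < h.length := by omega
  have G := pvSwapCat_getD h j hjl
  obtain ⟨⟨t, ht1, ht2, ht3⟩, hw⟩ := hV
  rcases Nat.lt_or_ge j v with hjv | hjv
  · have hjv1 : j + 1 < v := by omega
    constructor
    · refine ⟨t, ht1, ht2, ?_⟩
      rw [G t, G v, if_neg (by omega), if_neg (by omega), if_neg (by omega), if_neg (by omega)]
      exact ht3
    · intro r hr1 hr2 hr3
      rw [G r, G v, if_neg (by omega), if_neg (by omega), if_neg (by omega), if_neg (by omega)]
      exact hw r hr1 hr2 hr3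
  · have hjv2 : v < j := by omega
    have hGv : (pvSwapCat h j).getD v 0 = h.getD v 0 := by
      rw [G v, if_neg (by omega), if_neg (by omega)]
    constructor
    · by_cases h1 : t = j
      · refine ⟨j+1, by omega, hjm, ?_⟩
        rw [G (j+1), if_neg (by omega), if_pos rfl, hGv]
        exact h1 ▸ ht3
      · by_cases h2 : t = j+1
        · refine ⟨j, by omega, by omega, ?_⟩
          rw [G j, if_pos rfl, hGv]
          exact h2 ▸ ht3
        · refine ⟨t, ht1, ht2, ?_⟩
          rw [G t, if_neg h1, if_neg h2, hGv]
          exact ht3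
    · intro r hr1 hr2 hr3
      rw [G r, hGv]
      by_cases h1 : r = j
      · subst h1
        rw [if_pos rfl]
        exact hw (r+1) (by omega) (by omega) hjm
      · by_cases h2 : r = j+1
        · subst h2
          rw [if_neg (by omega), if_pos rfl]
          exact hw j (by omega) (by omega) (by omega)
        · rw [if_neg h1, if_neg h2]
          exact hw r hr1 hr2 hr3

-- ===== VERDICT (by name: the statement is the Claim_ definition above) =====
theorem is_beautiful_spec : Claim_equal_is_beautiful := by
  intro n k hs _ hpre
  unfold Spec_is_beautiful
  rw [is_beautiful, is_beautiful_alt]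
  set m := n.toNat with hm
  by_cases hb : pvFirstViolB hs k m = -1
  · rw [if_pos ((pvBeautifulA_iff hs k m).mpr ((pvFirstViolB_neg1_iff hs k m).mp hb)),
      if_pos hb]
  · have hlen : m ≤ hs.length := by
      unfold Pre_is_beautiful at hpre
      rcases hpre with hle | ⟨hn1, hnil⟩
      · omega
      · exfalso
        apply hb
        subst hnil
        rw [show m = 1 by omega]
        simp [pvFirstViolB, pvNsB, pvFVLoop, List.getD]
    obtain ⟨v, hvm, hfv, hViol⟩ := pvFirstViolB_viol hs k m hb
    have hbA : ¬ pvBeautifulA hs k m = true := fun hball =>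
      ((pvBeautifulA_iff hs k m).mp hball v hvm) hViol
    rw [if_neg hbA, if_neg hb, hfv]
    have hiff : pvSwapLoopA hs k m (List.range (m - 1)) = true ↔
        pvTryB hs k m [(v : Int) - 1, (v : Int), (v : Int) + k] = true := by
      rw [pvSwapLoopA_iff, pvTryB_iff]
      constructor
      · rintro ⟨i, hmem, hgt, hbeaut⟩
        have him : i < m - 1 := List.mem_range.mp hmem
        have hi1 : i + 1 < m := by omega
        have hi1l : i + 1 < hs.length := by omega
        rw [pvSwapAdj_eq_cat hs i hi1l] at hbeaut
        have hall := (pvBeautifulA_iff _ k m).mp hbeaut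
        have hnv : ¬ pvViol (pvSwapCat hs i) k m v := hall v hvm
        have hcases : (i : Int) = (v : Int) - 1 ∨ i = v ∨ (i : Int) = (v : Int) + k := by
          by_contra hno
          push Not at hno
          exact hnv (pvViol_swap hs k m v i hlen hvm hi1 hViol hno.1 hno.2.1 hno.2.2)
        refine ⟨(i : Int), ?_, by omega, by omega, ?_, ?_⟩
        · rcases hcases with hc | hc | hc
          · rw [hc]; simp
          · rw [hc]; simp
          · rw [hc]; simp
        · simpa using hgt
        · rw [show ((i : Int)).toNat = i by simp]
          exact (pvFirstViolB_neg1_iff _ k m).mpr hall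
      · rintro ⟨j, hmem, hj0, hjle, hgt, hfv0⟩
        refine ⟨j.toNat, List.mem_range.mpr (by omega), hgt, ?_⟩
        have hjl : j.toNat + 1 < hs.length := by omega
        rw [pvSwapAdj_eq_cat hs j.toNat hjl]
        exact (pvBeautifulA_iff _ k m).mpr ((pvFirstViolB_neg1_iff _ k m).mp hfv0)
    have heq : pvSwapLoopA hs k m (List.range (m - 1)) =
        pvTryB hs k m [(v : Int) - 1, (v : Int), (v : Int) + k] := by
      cases hA : pvSwapLoopA hs k m (List.range (m - 1)) with
      | true => exact (hiff.mp hA).symm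
      | false =>
          cases hB : pvTryB hs k m [(v : Int) - 1, (v : Int), (v : Int) + k] with
          | false => rfl
          | true => exact absurd (hiff.mpr hB) (by rw [hA]; simp)
    rw [heq]
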